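-- pv_equiv track=rewrite | github.com/deysantanu84/python-portfolio | problemSolving/multiplicationPrevNext.py | solve
-- ===== SOURCE A (Python) =====
-- def solve(A):
--     if len(A) <= 1:
--         return A
--     result = A.copy()
--     result[0] = A[0] * A[1]
--     result[-1] = A[-1] * A[-2]
--     for i in range(1, len(A)-1):
--         result[i] = A[i-1] * A[i+1]
--
--     return result
-- ===== SOURCE B (Python) =====
-- def solve(A):
--     if len(A) <= 1:
--         return A
--     left = [A[0]] + A[:-1]
--     right = A[1:] + [A[-1]]
--     return [l * r for l, r in zip(left, right)]
-- ===== Notes on version B (the rewrite author's own statement) =====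
-- stated objective: simpler
-- what changed: Replaces the copy-then-overwrite index loop with endpoint special cases by one uniform zip over two pre-shifted neighbor lists ([A[0]]+A[:-1] and A[1:]+[A[-1]]), so endpoints need no separate assignments.
import Mathlib
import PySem

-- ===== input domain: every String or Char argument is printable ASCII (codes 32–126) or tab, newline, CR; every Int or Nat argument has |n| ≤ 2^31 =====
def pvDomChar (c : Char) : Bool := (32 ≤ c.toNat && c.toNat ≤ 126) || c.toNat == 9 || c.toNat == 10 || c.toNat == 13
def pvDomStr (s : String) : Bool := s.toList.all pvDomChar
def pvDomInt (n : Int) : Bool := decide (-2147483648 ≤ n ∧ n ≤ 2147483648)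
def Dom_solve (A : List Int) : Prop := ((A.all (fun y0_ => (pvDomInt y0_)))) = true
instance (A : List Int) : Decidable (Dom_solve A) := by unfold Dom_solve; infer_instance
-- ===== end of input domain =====

-- B replaces A's copy-then-overwrite index loop (with separate endpoint assignments)
-- by one uniform zip over two pre-shifted neighbor lists; same O(n) cost, no endpoint cases.

-- ===== PORT A =====
-- A copies the list, overwrites both endpoints, then overwrites every interior
-- position i with A[i-1]*A[i+1].  All indices are in range since len(A) >= 2 in
-- this branch, so pyGetD/pySetD are exact here.
def solve (A : List Int) : List Int :=
  if A.length ≤ 1 then A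
  else
    let result := A
    let result := PySem.List.pySetD result 0
      (PySem.List.pyGetD A 0 0 * PySem.List.pyGetD A 1 0)
    let result := PySem.List.pySetD result (-1)
      (PySem.List.pyGetD A (-1) 0 * PySem.List.pyGetD A (-2) 0)
    (PySem.List.pyRange 1 ((A.length : Int) - 1) 1).foldl
      (fun r i => PySem.List.pySetD r i
        (PySem.List.pyGetD A (i - 1) 0 * PySem.List.pyGetD A (i + 1) 0)) result

-- ===== PORT B =====
-- left = [A[0]] + A[:-1], right = A[1:] + [A[-1]], elementwise product of the zip.
def solve_alt (A : List Int) : List Int :=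
  if A.length ≤ 1 then A
  else
    let left := [PySem.List.pyGetD A 0 0] ++ PySem.List.slice A none (some (-1))
    let right := PySem.List.slice A (some 1) none ++ [PySem.List.pyGetD A (-1) 0]
    (left.zip right).map (fun p => p.1 * p.2)

-- ===== PRECONDITION & SPEC =====
def Spec_solve (A : List Int) (out : List Int) : Prop := out = solve_alt A
instance (A : List Int) (out : List Int) : Decidable (Spec_solve A out) := by unfold Spec_solve; infer_instance

-- ===== CLAIM (what is proved, stated in full; the proofs are below) =====
def Claim_equal_solve : Prop := ∀ (A : List Int), Dom_solve A → Spec_solve A (solve A)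

-- ===== LEMMAS AND PROOFS =====

-- A's interior loop preserves the length of the accumulator
theorem length_foldl_pySetD (f : Int → Int) (l : List Int) (r : List Int) :
    (l.foldl (fun r i => PySem.List.pySetD r i (f i)) r).length = r.length := by
  induction l generalizing r with
  | nil => rfl
  | cons x xs ih => simp [ih, PySem.List.length_pySetD]

theorem getElem?_foldl_pySetD (f : Int → Int) (r : List Int) (m : Nat)
    (hm : m + 1 ≤ r.length) (j : Nat) :
    ((PySem.List.pyRange 1 (1 + (m : Int)) 1).foldl
        (fun r i => PySem.List.pySetD r i (f i)) r)[j]? =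
      if 1 ≤ j ∧ j < 1 + m then some (f j) else r[j]? := by
  induction m with
  | zero =>
    rw [show (1 + ((0:Nat):Int)) = 1 by norm_num, PySem.List.pyRange_one_eq_nil le_rfl,
        if_neg (by omega)]
    rfl
  | succ m ih =>
    have h1 : (1:Int) ≤ 1 + m := by omega
    rw [show (1 + ((m+1:Nat):Int)) = (1 + (m:Int)) + 1 by push_cast; ring,
        PySem.List.pyRange_one_succ_right h1, List.foldl_append]
    simp only [List.foldl_cons, List.foldl_nil]
    rw [PySem.List.pySetD_of_nonneg _ _ (show (0:Int) ≤ 1 + (m:Int) by positivity)]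
    have hlen : ((PySem.List.pyRange 1 (1 + (m : Int)) 1).foldl
        (fun r i => PySem.List.pySetD r i (f i)) r).length = r.length :=
      length_foldl_pySetD f _ r
    rw [List.getElem?_set]
    have htn : ((1 + (m:Int)).toNat) = m + 1 := by omega
    rw [htn]
    by_cases hj : m + 1 = j
    · subst hj
      rw [if_pos rfl, length_foldl_pySetD, if_pos (by omega), if_pos (by omega)]
      congr 2
      push_cast
      ring
    · simp only [if_neg hj]
      rw [ih (by omega)]
      split_ifs <;> first | rfl | omega

-- result[-1] = v on a nonempty list is a set at the last position
theorem pySetD_neg_one (xs : List Int) (v : Int) (h : xs ≠ []) :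
    PySem.List.pySetD xs (-1) v = xs.set (xs.length - 1) v := by
  have hl : 1 ≤ xs.length := List.length_pos_iff.mpr h
  simp only [PySem.List.pySetD, PySem.List.pySet?, PySem.List.pyIdx?]
  rw [if_neg (by norm_num), if_pos (by omega)]
  rfl

theorem solve_eq_solve_alt (A : List Int) : solve A = solve_alt A := by
  by_cases h : A.length ≤ 1
  · simp [solve, solve_alt, h]
  · have hn : 2 ≤ A.length := by omega
    have hA : A ≠ [] := by intro e; rw [e] at hn; simp at hn
    simp only [solve, solve_alt, if_neg h]
    rw [PySem.List.pySetD_of_nonneg A _ le_rfl]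
    rw [pySetD_neg_one _ _ (by simpa using hA)]
    rw [show ((A.length : Int) - 1) = 1 + ((A.length - 2 : Nat) : Int) by omega]
    rw [show PySem.List.slice A none (some (-1)) = A.take (A.length - 1) from by
      have := PySem.List.slice_to_neg_natCast (xs := A) (k := 1) (by norm_num)
      simpa using this]
    rw [show (some (1:Int)) = some (((1:Nat) : Int)) from by norm_num,
        PySem.List.slice_from_natCast]
    rw [PySem.List.pyGetD_neg_one A 0 hA]
    rw [PySem.List.pyGetD_neg_ofNat A 2 0 (by omega) (by omega)]
    rw [PySem.List.pyGetD_eq_getElem A (i := 0) 0 (by norm_num) (by omega)]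
    rw [PySem.List.pyGetD_eq_getElem A (i := 1) 0 (by norm_num) (by omega)]
    rw [List.map_zip_eq_zipWith]
    apply List.ext_getElem?
    intro j
    rw [getElem?_foldl_pySetD _ _ (A.length - 2) (by simp; omega) j]
    rw [List.getElem?_zipWith]
    simp only [Int.toNat_zero, Int.toNat_one, List.length_set, List.singleton_append]
    rcases Nat.lt_or_ge j A.length with hj | hj
    · rcases eq_or_ne j 0 with rfl | hj0
      · -- first element
        rw [if_neg (by omega), List.getElem?_set,
            if_neg (by omega : ¬ A.length - 1 = 0), List.getElem?_set,
            if_pos (rfl : (0:Nat) = 0), if_pos (by omega : 0 < A.length)]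
        rw [List.getElem?_cons_zero, List.getElem?_append_left (by simp; omega),
            List.getElem?_drop, List.getElem?_eq_getElem (by omega)]
        rfl
      · obtain ⟨jj, rfl⟩ : ∃ jj, j = jj + 1 := ⟨j - 1, by omega⟩
        rcases eq_or_ne (jj + 1) (A.length - 1) with hlast | hmid
        · -- last element
          rw [if_neg (by omega), List.getElem?_set,
              if_pos (by omega : A.length - 1 = jj + 1)]
          simp only [List.length_set]
          rw [if_pos (by omega : A.length - 1 < A.length)]
          rw [List.getElem?_cons_succ, List.getElem?_take,
              if_pos (by omega : jj < A.length - 1),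
              List.getElem?_eq_getElem (by omega)]
          rw [List.getElem?_append_right (by simp; omega)]
          simp only [List.length_drop]
          rw [show jj + 1 - (A.length - 1) = 0 from by omega, List.getElem?_cons_zero]
          rw [List.getLast_eq_getElem hA]
          have : jj = A.length - 2 := by omega
          subst this
          simp [mul_comm]
        · -- interior element
          rw [if_pos (by omega : 1 ≤ jj + 1 ∧ jj + 1 < 1 + (A.length - 2))]
          rw [List.getElem?_cons_succ, List.getElem?_take,
              if_pos (by omega : jj < A.length - 1),
              List.getElem?_eq_getElem (by omega)]
          rw [List.getElem?_append_left (by simp; omega), List.getElem?_drop,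
              List.getElem?_eq_getElem (by omega)]
          rw [PySem.List.pyGetD_eq_getElem A 0 (by push_cast; omega) (by push_cast; omega),
              PySem.List.pyGetD_eq_getElem A 0 (by push_cast; omega) (by push_cast; omega)]
          have e1 : ((jj + 1 : Nat) - 1 : Int).toNat = jj := by omega
          have e2 : ((jj + 1 : Nat) + 1 : Int).toNat = 1 + (jj + 1) := by omega
          simp only [e1, e2]
          rfl
    · -- out of range: both sides none
      rw [if_neg (by omega), List.getElem?_eq_none (by simp; omega),
          List.getElem?_eq_none (by simp; omega)]

-- ===== VERDICT (by name: the statement is the Claim_ definition above) =====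
theorem solve_spec : Claim_equal_solve := by
  intro A _
  unfold Spec_solve
  exact solve_eq_solve_alt A
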